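-- pv_equiv track=rewrite | github.com/MMMJB/arbitrage-attempt | simulate_trades.py | get_chain_from_id
-- ===== SOURCE A (Python) =====
-- from typing import Any, Union, Tuple
--
-- def get_chain_from_id(instruments: list[str], id: Union[int, None]) -> list[str]:
--     num_instruments = len(instruments)
--     instruments_list = []
--
--     if id is None or id == 0:
--         return instruments_list
--
--     for i in range(num_instruments):
--         if id > 0:
--             instruments_list.append(instruments[(id + i) % num_instruments])
--         else:
--             instruments_list.append(instruments[(-id - i) % num_instruments])
--
--     return instruments_list
-- ===== SOURCE B (Python) =====
-- def get_chain_from_id(instruments, id):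
--     n = len(instruments)
--     if id is None or id == 0 or n == 0:
--         return []
--     if id > 0:
--         k = id % n
--         return instruments[k:] + instruments[:k]
--     s = (-id + 1) % n
--     rot = instruments[s:] + instruments[:s]
--     return rot[::-1]
-- ===== Notes on version B (the rewrite author's own statement) =====
-- stated objective: alternative
-- what changed: B replaces A's index-by-index loop with (id±i)%n arithmetic by two slice concatenations: for id>0 it returns instruments[k:]+instruments[:k] with k=id%n, and for id<0 it builds the rotation at s=(-id+1)%n and reverses it.
import Mathlib
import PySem

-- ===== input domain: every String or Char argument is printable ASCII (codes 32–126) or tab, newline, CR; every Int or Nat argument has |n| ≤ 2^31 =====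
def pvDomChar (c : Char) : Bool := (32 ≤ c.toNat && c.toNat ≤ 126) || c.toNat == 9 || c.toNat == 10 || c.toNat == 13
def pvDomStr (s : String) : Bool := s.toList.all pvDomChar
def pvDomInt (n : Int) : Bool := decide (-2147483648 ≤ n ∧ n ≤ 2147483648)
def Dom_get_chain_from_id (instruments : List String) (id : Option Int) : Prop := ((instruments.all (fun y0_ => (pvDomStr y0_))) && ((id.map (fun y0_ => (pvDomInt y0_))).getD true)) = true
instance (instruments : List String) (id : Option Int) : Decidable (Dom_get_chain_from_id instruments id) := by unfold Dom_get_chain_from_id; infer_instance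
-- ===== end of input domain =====

-- B builds the rotated chain by slice concatenation (and one reverse for negative ids)
-- instead of A's element-by-element loop with (id±i)%n indexing; same cost, different decomposition.

-- ===== PORT A =====
-- Loop over range(n); the Python index (id+i)%n / (-id-i)%n is always in range when the
-- loop runs (n > 0 and Python % with a positive divisor is in [0,n)), so pyGetD's default is never used.
def get_chain_from_id (instruments : List String) (id : Option Int) : List String :=
  let num_instruments : Int := instruments.length
  match id with
  | none => []
  | some id =>
    if id = 0 then []
    else
      (PySem.List.pyRange 0 num_instruments 1).foldl
        (fun acc i =>
          if id > 0 then
            acc ++ [PySem.List.pyGetD instruments (PySem.Int.mod (id + i) num_instruments) ""]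
          else
            acc ++ [PySem.List.pyGetD instruments (PySem.Int.mod (-id - i) num_instruments) ""])
        []

-- ===== PORT B =====
def get_chain_from_id_alt (instruments : List String) (id : Option Int) : List String :=
  let n : Int := instruments.length
  match id with
  | none => []
  | some id =>
    if id = 0 ∨ n = 0 then []
    else if id > 0 then
      let k := PySem.Int.mod id n
      PySem.List.slice instruments (some k) none ++ PySem.List.slice instruments none (some k)
    else
      let s := PySem.Int.mod (-id + 1) n
      (PySem.List.slice instruments (some s) none ++ PySem.List.slice instruments none (some s)).reverse

-- ===== PRECONDITION & SPEC =====
def Spec_get_chain_from_id (instruments : List String) (id : Option Int) (out : List String) : Prop := out = get_chain_from_id_alt instruments id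
instance (instruments : List String) (id : Option Int) (out : List String) : Decidable (Spec_get_chain_from_id instruments id out) := by unfold Spec_get_chain_from_id; infer_instance

-- ===== CLAIM (what is proved, stated in full; the proofs are below) =====
def Claim_equal_get_chain_from_id : Prop := ∀ (instruments : List String) (id : Option Int), Dom_get_chain_from_id instruments id → Spec_get_chain_from_id instruments id (get_chain_from_id instruments id)

-- ===== LEMMAS AND PROOFS =====

-- e % n (Int emod) as a Nat, characterised by a congruence and a bound.
lemma pv_emod_toNat_eq {n : Nat} (_hn : 0 < n) {e : Int} {m : Nat} (hm : m < n)
    (hd : (n : Int) ∣ e - m) : (e % (n : Int)).toNat = m := by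
  have h2 : ((m : Int)) % n = m :=
    Int.emod_eq_of_lt (by positivity) (by exact_mod_cast hm)
  have h1 : e % (n : Int) = (m : Int) % n :=
    Int.emod_eq_emod_iff_emod_sub_eq_zero.mpr (Int.emod_eq_zero_of_dvd hd)
  rw [h1, h2]; exact Int.toNat_natCast m

lemma pv_dvd_sub_emod (n v : Int) : n ∣ v - v % n := by
  exact ⟨v / n, by have := Int.emod_add_mul_ediv v n; linarith⟩

-- A's positive-id loop body, as a map over range, equals B's slice rotation.
lemma pv_rot_pos (xs : List String) (v : Int) (k : Nat) (hne : xs ≠ [])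
    (hk : (k : Int) = v % (xs.length : Int)) :
    (List.range xs.length).map
        (fun (j : Nat) => PySem.List.pyGetD xs ((v + (j : Int)) % (xs.length : Int)) "")
      = xs.drop k ++ xs.take k := by
  have hn : 0 < xs.length := List.length_pos_iff.mpr hne
  have hnz : (xs.length : Int) ≠ 0 := by exact_mod_cast hn.ne'
  have hnp : (0 : Int) < xs.length := by exact_mod_cast hn
  have hkn : k < xs.length := by
    have := Int.emod_lt_of_pos v hnp
    omega
  have hdvd : (xs.length : Int) ∣ v - k := by rw [hk]; exact pv_dvd_sub_emod _ v
  apply List.ext_getElem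
  · simp; omega
  · intro j h1 h2
    simp only [List.getElem_map, List.getElem_range]
    rw [PySem.List.pyGetD_eq_getElem xs "" (Int.emod_nonneg _ hnz) (Int.emod_lt_of_pos _ hnp)]
    have hj : j < xs.length := by simpa using h1
    by_cases hc : k + j < xs.length
    · have hm : ((v + (j : Int)) % (xs.length : Int)).toNat = k + j := by
        apply pv_emod_toNat_eq hn hc
        have : v + (j : Int) - (↑(k + j) : Int) = v - k := by push_cast; ring
        rw [this]; exact hdvd
      simp only [hm]; rw [List.getElem_append_left (by simp; omega)]
      simp
    · have hm : ((v + (j : Int)) % (xs.length : Int)).toNat = k + j - xs.length := by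
        apply pv_emod_toNat_eq hn (by omega)
        have : v + (j : Int) - (↑(k + j - xs.length) : Int) = (v - k) + xs.length := by
          push_cast [Nat.cast_sub (by omega : xs.length ≤ k + j)]; ring
        rw [this]; exact dvd_add hdvd ⟨1, by ring⟩
      simp only [hm]; rw [List.getElem_append_right (by simp; omega)]
      simp; congr 1; omega

-- A's negative-id loop body, as a map over range, equals B's reversed slice rotation.
lemma pv_rot_neg (xs : List String) (b : Int) (s : Nat) (hne : xs ≠ [])
    (hs : (s : Int) = (b + 1) % (xs.length : Int)) :
    (List.range xs.length).map
        (fun (j : Nat) => PySem.List.pyGetD xs ((b - (j : Int)) % (xs.length : Int)) "")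
      = (xs.drop s ++ xs.take s).reverse := by
  have hn : 0 < xs.length := List.length_pos_iff.mpr hne
  have hnz : (xs.length : Int) ≠ 0 := by exact_mod_cast hn.ne'
  have hnp : (0 : Int) < xs.length := by exact_mod_cast hn
  have hsn : s < xs.length := by
    have := Int.emod_lt_of_pos (b + 1) hnp
    omega
  have hdvd : (xs.length : Int) ∣ (b + 1) - s := by rw [hs]; exact pv_dvd_sub_emod _ (b + 1)
  apply List.ext_getElem
  · simp; omega
  · intro j h1 h2
    simp only [List.getElem_map, List.getElem_range]
    rw [PySem.List.pyGetD_eq_getElem xs "" (Int.emod_nonneg _ hnz) (Int.emod_lt_of_pos _ hnp)]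
    have hj : j < xs.length := by simpa using h1
    rw [List.getElem_reverse]
    by_cases hc : s ≤ j
    · have hm : ((b - (j : Int)) % (xs.length : Int)).toNat = s + (xs.length - 1 - j) := by
        apply pv_emod_toNat_eq hn (by omega)
        have : b - (j : Int) - (↑(s + (xs.length - 1 - j)) : Int) = ((b + 1) - s) - xs.length := by
          push_cast; omega
        rw [this]; exact dvd_sub hdvd ⟨1, by ring⟩
      simp only [hm]; rw [List.getElem_append_left (by simp; omega)]
      simp; congr 1; omega
    · have hm : ((b - (j : Int)) % (xs.length : Int)).toNat = s - 1 - j := by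
        apply pv_emod_toNat_eq hn (by omega)
        have : b - (j : Int) - (↑(s - 1 - j) : Int) = (b + 1) - s := by
          omega
        rw [this]; exact hdvd
      simp only [hm]; rw [List.getElem_append_right (by simp; omega)]
      simp; congr 1; omega

-- ===== VERDICT (by name: the statement is the Claim_ definition above) =====
theorem get_chain_from_id_spec : Claim_equal_get_chain_from_id := by
  intro instruments id _
  unfold Spec_get_chain_from_id get_chain_from_id get_chain_from_id_alt
  match id with
  | none => rfl
  | some v =>
    simp only
    by_cases hv0 : v = 0
    · simp [hv0]
    · by_cases hne : instruments = []
      · subst hne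
        simp [hv0, PySem.List.pyRange]
      · have hn : 0 < instruments.length := List.length_pos_iff.mpr hne
        have hnz : (instruments.length : Int) ≠ 0 := by exact_mod_cast hn.ne'
        have hnp : (0 : Int) < instruments.length := by exact_mod_cast hn
        rw [if_neg hv0, if_neg (by push Not; exact ⟨hv0, hnz⟩)]
        by_cases hvp : v > 0
        · rw [if_pos hvp]
          simp only [if_pos hvp]
          rw [show ((instruments.length : Int)) = ((instruments.length : Nat) : Int) from rfl,
              PySem.List.pyRange_zero_natCast,
              List.foldl_map, PySem.List.foldl_append_singleton_eq_map, List.nil_append]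
          simp only [PySem.Int.mod_eq_emod_of_pos hnp]
          rw [PySem.List.slice_from instruments (Int.emod_nonneg v hnz),
              PySem.List.slice_to instruments (Int.emod_nonneg v hnz)]
          exact pv_rot_pos instruments v (v % (instruments.length : Int)).toNat hne
            (by rw [Int.toNat_of_nonneg (Int.emod_nonneg v hnz)])
        · rw [if_neg hvp]
          simp only [if_neg hvp]
          rw [show ((instruments.length : Int)) = ((instruments.length : Nat) : Int) from rfl,
              PySem.List.pyRange_zero_natCast,
              List.foldl_map, PySem.List.foldl_append_singleton_eq_map, List.nil_append]
          simp only [PySem.Int.mod_eq_emod_of_pos hnp]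
          rw [PySem.List.slice_from instruments (Int.emod_nonneg _ hnz),
              PySem.List.slice_to instruments (Int.emod_nonneg _ hnz)]
          exact pv_rot_neg instruments (-v) ((-v + 1) % (instruments.length : Int)).toNat hne
            (by rw [Int.toNat_of_nonneg (Int.emod_nonneg _ hnz)])
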